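-- pv_equiv track=rewrite | github.com/Zenidog8/IC-1803-taller-de-programacion | examen2.py | subMatMax
-- ===== SOURCE A (Python) =====
-- def fila_nula(largo):
--     return [0] * largo
--
-- def matriz_nula(filas, columnas):
--     mat = []
--     for _ in range(filas):
--         mat.append(fila_nula(columnas))
--     return mat
--
-- def acumulada(matriz):
--     n, m = len(matriz), len(matriz[0])
--     res = matriz_nula(n + 1, m + 1)
--     for i in range(1, n + 1):
--         for j in range(1, m + 1):
--             res[i][j] = matriz[i-1][j-1] + \
--                 res[i-1][j] + res[i][j-1] - res[i-1][j-1]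
--     return res
--
-- def range_query(matacumulada, r1, c1, r2, c2):
--     return matacumulada[r2 + 1][c2 + 1] - matacumulada[r1][c2 + 1] - matacumulada[r2 + 1][c1] + matacumulada[r1][c1]
--
-- def subMatMax(matriz):
--     matacumulada = acumulada(matriz)
--     n, m = len(matriz), len(matriz[0])
--     res = -1
--     coordenada = [(-1, -1), (-1, -1)]
--     for k in range(1, n):
--         tamano = k - 1
--         for i in range(n - tamano):
--             for j in range(m - tamano):
--                 local = range_query(matacumulada, i, j, i + tamano, j + tamano)
--                 if not (local % 7) and local > res:
--                     res = local
--                     coordenada = [(i, j), (i + tamano, j + tamano)]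
--     return coordenada
-- ===== SOURCE B (Python) =====
-- def subMatMax(matriz):
--     n, m = len(matriz), len(matriz[0])
--     res = -1
--     coordenada = [(-1, -1), (-1, -1)]
--     for tamano in range(n - 1):
--         for i in range(n - tamano):
--             for j in range(m - tamano):
--                 local = sum(sum(fila[j:j + tamano + 1]) for fila in matriz[i:i + tamano + 1])
--                 if local % 7 == 0 and local > res:
--                     res = local
--                     coordenada = [(i, j), (i + tamano, j + tamano)]
--     return coordenada
-- ===== Notes on version B (the rewrite author's own statement) =====
-- stated objective: simpler
-- what changed: Dropped the acumulada prefix-sum table and its range_query/matriz_nula helpers entirely; each candidate square's sum is computed directly by slicing and summing its rows.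
import Mathlib
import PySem

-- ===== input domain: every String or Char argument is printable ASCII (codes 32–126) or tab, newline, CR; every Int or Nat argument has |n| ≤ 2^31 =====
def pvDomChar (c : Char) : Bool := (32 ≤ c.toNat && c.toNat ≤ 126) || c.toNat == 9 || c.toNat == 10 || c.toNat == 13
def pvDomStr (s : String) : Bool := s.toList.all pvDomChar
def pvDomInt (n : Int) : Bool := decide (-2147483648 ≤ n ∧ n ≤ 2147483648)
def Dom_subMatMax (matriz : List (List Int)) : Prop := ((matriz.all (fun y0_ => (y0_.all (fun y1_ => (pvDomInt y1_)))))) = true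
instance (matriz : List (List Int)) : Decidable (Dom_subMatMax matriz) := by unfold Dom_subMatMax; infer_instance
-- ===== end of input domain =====

-- B removes A's prefix-sum table (acumulada/range_query/matriz_nula): each square is summed directly over its rows by slicing; objective: simpler, not faster.


-- ===== PORT A =====
-- mat[i][j] read/write on the list-of-lists table; inside Pre_ every index taken is in
-- range, so the getD defaults are never reached where Python would raise.
def pvGet2 (mat : List (List Int)) (i j : Nat) : Int := (mat.getD i []).getD j 0
def pvSetCell (mat : List (List Int)) (i j : Nat) (v : Int) : List (List Int) :=
  mat.set i ((mat.getD i []).set j v)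

def filaNula (largo : Nat) : List Int := List.replicate largo 0

def matrizNula (filas columnas : Nat) : List (List Int) :=
  (List.range filas).foldl (fun mat _ => mat ++ [filaNula columnas]) []

def acumulada (matriz : List (List Int)) : List (List Int) :=
  let n := matriz.length
  let m := (matriz.getD 0 []).length
  (List.range' 1 n).foldl (fun res i =>
    (List.range' 1 m).foldl (fun res j =>
      pvSetCell res i j (pvGet2 matriz (i-1) (j-1) + pvGet2 res (i-1) j
        + pvGet2 res i (j-1) - pvGet2 res (i-1) (j-1))) res)
    (matrizNula (n+1) (m+1))

def rangeQuery (mac : List (List Int)) (r1 c1 r2 c2 : Nat) : Int :=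
  pvGet2 mac (r2+1) (c2+1) - pvGet2 mac r1 (c2+1) - pvGet2 mac (r2+1) c1 + pvGet2 mac r1 c1

def subMatMax (matriz : List (List Int)) : List (Int × Int) :=
  let mac := acumulada matriz
  let n := matriz.length
  let m := (matriz.getD 0 []).length
  let st := (List.range' 1 (n-1)).foldl (fun (st : Int × List (Int × Int)) k =>
      let tam := k - 1
      (List.range (n - tam)).foldl (fun st i =>
        (List.range (m - tam)).foldl (fun st j =>
          let lcl := rangeQuery mac i j (i + tam) (j + tam)
          if PySem.Int.mod lcl 7 = 0 ∧ st.1 < lcl then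
            (lcl, [((i : Int), (j : Int)), ((i : Int) + (tam : Int), (j : Int) + (tam : Int))])
          else st) st) st)
    (-1, [(-1, -1), (-1, -1)])
  st.2

-- ===== PORT B =====
def subMatMax_alt (matriz : List (List Int)) : List (Int × Int) :=
  let n := matriz.length
  let m := (matriz.getD 0 []).length
  let st := (List.range (n - 1)).foldl (fun (st : Int × List (Int × Int)) (tam : Nat) =>
      (List.range (n - tam)).foldl (fun st (i : Nat) =>
        (List.range (m - tam)).foldl (fun st (j : Nat) =>
          let lcl := ((PySem.List.slice matriz (some (i : Int)) (some ((i : Int) + (tam : Int) + 1))).map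
              (fun fila => (PySem.List.slice fila (some (j : Int)) (some ((j : Int) + (tam : Int) + 1))).sum)).sum
          if PySem.Int.mod lcl 7 = 0 ∧ st.1 < lcl then
            (lcl, [((i : Int), (j : Int)), ((i : Int) + (tam : Int), (j : Int) + (tam : Int))])
          else st) st) st)
    (-1, [(-1, -1), (-1, -1)])
  st.2

-- ===== PRECONDITION & SPEC =====
-- Pre_ excludes exactly the inputs where Python A raises an IndexError: the empty
-- matrix (len(matriz[0])) and matrices with some row shorter than the first row
-- (acumulada reads matriz[i-1][j-1] for every column index of the first row).
def Pre_subMatMax (matriz : List (List Int)) : Prop :=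
  matriz ≠ [] ∧ ∀ fila ∈ matriz, (matriz.headD []).length ≤ fila.length
instance (matriz : List (List Int)) : Decidable (Pre_subMatMax matriz) := by
  unfold Pre_subMatMax; infer_instance

def pvWitness_subMatMax : List (List Int) := [[7, 1], [2, 4]]

def Spec_subMatMax (matriz : List (List Int)) (out : List (Int × Int)) : Prop := out = subMatMax_alt matriz
instance (matriz : List (List Int)) (out : List (Int × Int)) : Decidable (Spec_subMatMax matriz out) := by unfold Spec_subMatMax; infer_instance

-- ===== CLAIM (what is proved, stated in full; the proofs are below) =====
def Claim_equal_subMatMax : Prop := ∀ (matriz : List (List Int)), Dom_subMatMax matriz → Pre_subMatMax matriz → Spec_subMatMax matriz (subMatMax matriz)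

-- ===== LEMMAS AND PROOFS =====

-- prefix sums of the input: pvS mz i j = sum of mz[a][b] over a < i, b < j
def pvS (mz : List (List Int)) (i j : Nat) : Int :=
  ∑ a ∈ Finset.range i, ∑ b ∈ Finset.range j, pvGet2 mz a b

-- the accumulation table after rows < i are filled and row i is filled through column j0
def pvPM (mz : List (List Int)) (n m i j0 : Nat) : List (List Int) :=
  (List.range (n+1)).map (fun r => (List.range (m+1)).map
    (fun c => if r < i ∨ (r = i ∧ c ≤ j0) then pvS mz r c else 0))

theorem pvS_zero_right (mz : List (List Int)) (i : Nat) : pvS mz i 0 = 0 := by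
  simp [pvS]

theorem pvS_zero_left (mz : List (List Int)) (j : Nat) : pvS mz 0 j = 0 := by
  simp [pvS]

theorem pvS_recur (mz : List (List Int)) (i j : Nat) (hi : 1 ≤ i) (hj : 1 ≤ j) :
    pvS mz i j = pvGet2 mz (i-1) (j-1) + pvS mz (i-1) j + pvS mz i (j-1) - pvS mz (i-1) (j-1) := by
  obtain ⟨i', rfl⟩ : ∃ i', i = i' + 1 := ⟨i - 1, by omega⟩
  obtain ⟨j', rfl⟩ : ∃ j', j = j' + 1 := ⟨j - 1, by omega⟩
  simp only [pvS, Finset.sum_range_succ, Nat.add_sub_cancel, Finset.sum_add_distrib]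
  ring

theorem set_map_range {α : Type} (k : Nat) (f : Nat → α) (i : Nat) (x : α) (_hk : i < k) :
    ((List.range k).map f).set i x = (List.range k).map (fun r => if r = i then x else f r) := by
  apply List.ext_getElem
  · simp
  · intro r h1 h2
    have hr : r < k := by simpa using h2
    rw [List.getElem_set]
    simp only [List.getElem_map, List.getElem_range]
    split_ifs with h1' h2' h3' <;> first | rfl | omega

theorem matrizNula_eq (filas columnas : Nat) :
    matrizNula filas columnas = List.replicate filas (List.replicate columnas 0) := by
  induction filas with
  | zero => simp [matrizNula]
  | succ f ih =>
      simp only [matrizNula, List.range_succ, List.foldl_append, List.foldl_cons, List.foldl_nil]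
      rw [show (List.range f).foldl (fun mat _ => mat ++ [filaNula columnas]) [] = matrizNula f columnas from rfl, ih]
      simp [filaNula, List.replicate_succ']

theorem pvPM_start (mz : List (List Int)) (n m : Nat) :
    List.replicate (n+1) (List.replicate (m+1) 0) = pvPM mz n m 1 0 := by
  symm
  rw [pvPM, List.eq_replicate_iff]
  refine ⟨by simp, ?_⟩
  intro row hrow
  rw [List.mem_map] at hrow
  obtain ⟨r, hr, rfl⟩ := hrow
  rw [List.eq_replicate_iff]
  refine ⟨by simp, ?_⟩
  intro x hx
  rw [List.mem_map] at hx
  obtain ⟨c, hc, rfl⟩ := hx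
  split_ifs with h
  · rcases h with h | ⟨rfl, hc0⟩
    · have : r = 0 := by omega
      subst this; exact pvS_zero_left mz _
    · have : c = 0 := by omega
      subst this; exact pvS_zero_right mz _
  · rfl

theorem pvPM_get (mz : List (List Int)) (n m i j0 r c : Nat) (hr : r ≤ n) (hc : c ≤ m) :
    pvGet2 (pvPM mz n m i j0) r c = if r < i ∨ (r = i ∧ c ≤ j0) then pvS mz r c else 0 := by
  rw [pvGet2, pvPM, PySem.List.getD_map_range _ _ _ _ (by omega),
    PySem.List.getD_map_range _ _ _ _ (by omega)]

theorem pvPM_set (mz : List (List Int)) (n m i j : Nat) (hi1 : 1 ≤ i) (hi : i ≤ n)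
    (hj1 : 1 ≤ j) (hj : j ≤ m) :
    pvSetCell (pvPM mz n m i (j-1)) i j (pvS mz i j) = pvPM mz n m i j := by
  rw [pvSetCell]
  conv_lhs => rw [pvPM, PySem.List.getD_map_range _ _ _ _ (by omega : i < n+1)]
  rw [set_map_range _ _ _ _ (by omega : j < m+1), set_map_range _ _ _ _ (by omega : i < n+1), pvPM]
  apply List.map_congr_left
  intro r hr
  split_ifs with hri
  · subst hri
    apply List.map_congr_left
    intro c hc
    by_cases hcj : c = j
    · subst hcj
      rw [if_pos rfl, if_pos (Or.inr ⟨rfl, le_refl _⟩)]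
    · rw [if_neg hcj]
      split_ifs with h1 h2 <;> first | rfl | omega
  · apply List.map_congr_left
    intro c hc
    split_ifs with h1 h2 <;> first | rfl | omega

theorem pvPM_next (mz : List (List Int)) (n m i : Nat) :
    pvPM mz n m i m = pvPM mz n m (i+1) 0 := by
  rw [pvPM, pvPM]
  apply List.map_congr_left
  intro r hr
  apply List.map_congr_left
  intro c hc
  have hcm : c < m + 1 := List.mem_range.mp hc
  by_cases h : r < i + 1
  · rw [if_pos (by omega : r < i ∨ (r = i ∧ c ≤ m)), if_pos (Or.inl h)]
  · rw [if_neg (by omega)]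
    by_cases h2 : r = i + 1 ∧ c ≤ 0
    · rw [if_pos (Or.inr h2)]
      have : c = 0 := by omega
      subst this
      exact (pvS_zero_right mz _).symm
    · rw [if_neg (by omega)]

theorem inner_fold (mz : List (List Int)) (n m i : Nat) (hi1 : 1 ≤ i) (hi : i ≤ n) :
    ∀ (c j0 : Nat), j0 + c = m →
    (List.range' (j0+1) c).foldl (fun res j =>
      pvSetCell res i j (pvGet2 mz (i-1) (j-1) + pvGet2 res (i-1) j
        + pvGet2 res i (j-1) - pvGet2 res (i-1) (j-1))) (pvPM mz n m i j0)
      = pvPM mz n m i m := by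
  intro c
  induction c with
  | zero => intro j0 h; simp only [List.range'_zero, List.foldl_nil]; rw [show j0 = m by omega]
  | succ c ih =>
      intro j0 h
      rw [List.range'_succ, List.foldl_cons]
      have hg1 : pvGet2 (pvPM mz n m i j0) (i-1) ((j0+1)) = pvS mz (i-1) (j0+1) := by
        rw [pvPM_get mz n m i j0 (i-1) (j0+1) (by omega) (by omega)]
        by_cases h1 : i = 1
        · subst h1; simp [pvS_zero_left]
        · rw [if_pos (Or.inl (by omega))]
      have hg2 : pvGet2 (pvPM mz n m i j0) i ((j0+1)-1) = pvS mz i j0 := by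
        rw [Nat.add_sub_cancel, pvPM_get mz n m i j0 i j0 (by omega) (by omega),
          if_pos (Or.inr ⟨rfl, le_refl _⟩)]
      have hg3 : pvGet2 (pvPM mz n m i j0) (i-1) ((j0+1)-1) = pvS mz (i-1) j0 := by
        rw [Nat.add_sub_cancel, pvPM_get mz n m i j0 (i-1) j0 (by omega) (by omega)]
        by_cases h1 : i = 1
        · subst h1; simp [pvS_zero_left]
        · rw [if_pos (Or.inl (by omega))]
      rw [hg1, hg2, hg3]
      have hv : pvGet2 mz (i-1) ((j0+1)-1) + pvS mz (i-1) (j0+1) + pvS mz i j0 - pvS mz (i-1) j0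
          = pvS mz i (j0+1) := by
        rw [pvS_recur mz i (j0+1) hi1 (by omega), Nat.add_sub_cancel]
      rw [hv]
      have hset := pvPM_set mz n m i (j0+1) hi1 hi (by omega) (by omega)
      rw [Nat.add_sub_cancel] at hset
      rw [hset]
      exact ih (j0+1) (by omega)

theorem outer_fold (mz : List (List Int)) (n m : Nat) :
    ∀ (c i : Nat), 1 ≤ i → i + c = n + 1 →
    (List.range' i c).foldl (fun res i =>
      (List.range' 1 m).foldl (fun res j =>
        pvSetCell res i j (pvGet2 mz (i-1) (j-1) + pvGet2 res (i-1) j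
          + pvGet2 res i (j-1) - pvGet2 res (i-1) (j-1))) res) (pvPM mz n m i 0)
      = pvPM mz n m (n+1) 0 := by
  intro c
  induction c with
  | zero =>
      intro i h1 h
      simp only [List.range'_zero, List.foldl_nil]
      rw [show i = n + 1 by omega]
  | succ c ih =>
      intro i h1 h
      rw [List.range'_succ, List.foldl_cons]
      have hin : (List.range' 1 m).foldl (fun res j =>
          pvSetCell res i j (pvGet2 mz (i-1) (j-1) + pvGet2 res (i-1) j
            + pvGet2 res i (j-1) - pvGet2 res (i-1) (j-1))) (pvPM mz n m i 0)
          = pvPM mz n m i m := by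
        have := inner_fold mz n m i h1 (by omega) m 0 (by omega)
        simpa using this
      rw [hin, pvPM_next]
      exact ih (i+1) (by omega) (by omega)

theorem acumulada_eq (mz : List (List Int)) :
    acumulada mz = pvPM mz mz.length (mz.getD 0 []).length (mz.length + 1) 0 := by
  show (List.range' 1 mz.length).foldl _ (matrizNula (mz.length+1) ((mz.getD 0 []).length+1)) = _
  rw [matrizNula_eq, pvPM_start mz mz.length (mz.getD 0 []).length]
  exact outer_fold mz mz.length (mz.getD 0 []).length mz.length 1 (by omega) (by omega)

theorem rq_eq (mz : List (List Int)) (i j t : Nat)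
    (hi : i + t + 1 ≤ mz.length) (hj : j + t + 1 ≤ (mz.getD 0 []).length) :
    rangeQuery (acumulada mz) i j (i + t) (j + t)
      = ∑ a ∈ Finset.range (t+1), ∑ b ∈ Finset.range (t+1), pvGet2 mz (i+a) (j+b) := by
  have hget : ∀ r c : Nat, r ≤ mz.length → c ≤ (mz.getD 0 []).length →
      pvGet2 (acumulada mz) r c = pvS mz r c := by
    intro r c hr hc
    rw [acumulada_eq, pvPM_get mz _ _ _ 0 r c hr hc, if_pos (Or.inl (by omega))]
  have e1 : ∀ c : Nat, pvS mz (i+t+1) c - pvS mz i c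
      = ∑ a ∈ Finset.range (t+1), ∑ b ∈ Finset.range c, pvGet2 mz (i+a) b := by
    intro c
    rw [pvS, pvS, ← Finset.sum_Ico_eq_sub _ (by omega : i ≤ i+t+1),
      Finset.sum_Ico_eq_sum_range]
    simp only [show i + t + 1 - i = t + 1 by omega]
  show pvGet2 (acumulada mz) (i+t+1) (j+t+1) - pvGet2 (acumulada mz) i (j+t+1)
      - pvGet2 (acumulada mz) (i+t+1) j + pvGet2 (acumulada mz) i j = _
  rw [hget (i+t+1) (j+t+1) (by omega) (by omega), hget i (j+t+1) (by omega) (by omega),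
    hget (i+t+1) j (by omega) (by omega), hget i j (by omega) (by omega)]
  have : pvS mz (i+t+1) (j+t+1) - pvS mz i (j+t+1) - pvS mz (i+t+1) j + pvS mz i j
      = (pvS mz (i+t+1) (j+t+1) - pvS mz i (j+t+1)) - (pvS mz (i+t+1) j - pvS mz i j) := by ring
  rw [this, e1 (j+t+1), e1 j, ← Finset.sum_sub_distrib]
  apply Finset.sum_congr rfl
  intro a _
  rw [← Finset.sum_Ico_eq_sub _ (by omega : j ≤ j+t+1), Finset.sum_Ico_eq_sum_range]
  simp only [show j + t + 1 - j = t + 1 by omega]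

-- B-side: the sliced sums equal the same double sum of pvGet2 entries
theorem slice_sum_eq (l : List Int) (i k : Nat) :
    ((l.drop i).take k).sum = ∑ b ∈ Finset.range k, l.getD (i+b) 0 := by
  induction k with
  | zero => simp
  | succ k ih =>
      rw [List.take_add_one, List.sum_append, ih, Finset.sum_range_succ]
      congr 1
      rw [List.getElem?_drop]
      cases h : l[i+k]? with
      | none =>
          have : l.length ≤ i + k := by
            rw [← List.getElem?_eq_none_iff]; exact h
          simp [List.getD_eq_getElem?_getD, h]
      | some x => simp [List.getD_eq_getElem?_getD, h]

theorem slice_map_sum_eq (mz : List (List Int)) (i k : Nat) (f : List Int → Int) (hf : f [] = 0) :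
    (((mz.drop i).take k).map f).sum = ∑ a ∈ Finset.range k, f (mz.getD (i+a) []) := by
  induction k with
  | zero => simp
  | succ k ih =>
      rw [List.take_add_one, List.map_append, List.sum_append, ih, Finset.sum_range_succ]
      congr 1
      rw [List.getElem?_drop]
      cases h : mz[i+k]? with
      | none => simp [List.getD_eq_getElem?_getD, h, hf]
      | some x => simp [List.getD_eq_getElem?_getD, h]

theorem alt_local_eq (mz : List (List Int)) (i j t : Nat) :
    ((PySem.List.slice mz (some (i : Int)) (some ((i : Int) + (t : Int) + 1))).map
        (fun fila => (PySem.List.slice fila (some (j : Int)) (some ((j : Int) + (t : Int) + 1))).sum)).sum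
      = ∑ a ∈ Finset.range (t+1), ∑ b ∈ Finset.range (t+1), pvGet2 mz (i+a) (j+b) := by
  have hrow : ∀ fila : List Int, (PySem.List.slice fila (some (j : Int)) (some ((j : Int) + (t : Int) + 1))).sum
      = ∑ b ∈ Finset.range (t+1), fila.getD (j+b) 0 := by
    intro fila
    rw [PySem.List.slice_toNat fila (by omega) (by omega)]
    rw [show ((j : Int) + (t : Int) + 1).toNat - ((j : Int)).toNat = t + 1 by omega,
      Int.toNat_natCast, slice_sum_eq]
  rw [PySem.List.slice_toNat mz (by omega) (by omega),
    show ((i : Int) + (t : Int) + 1).toNat - ((i : Int)).toNat = t + 1 by omega,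
    Int.toNat_natCast,
    slice_map_sum_eq mz i (t+1) _ (by rw [hrow]; simp)]
  apply Finset.sum_congr rfl
  intro a _
  rw [hrow]
  rfl

-- ===== VERDICT (by name: the statement is the Claim_ definition above) =====
theorem subMatMax_spec : Claim_equal_subMatMax := by
  intro matriz _ _
  show subMatMax matriz = subMatMax_alt matriz
  simp only [subMatMax, subMatMax_alt]
  congr 1
  rw [List.range'_eq_map_range, List.foldl_map]
  apply PySem.List.foldl_congr_mem'
  intro tam htam st
  have htam' : tam < matriz.length - 1 := List.mem_range.mp htam
  simp only [show ∀ t : Nat, 1 + t - 1 = t from fun t => by omega]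
  apply PySem.List.foldl_congr_mem'
  intro i hi st
  have hi' : i < matriz.length - tam := List.mem_range.mp hi
  apply PySem.List.foldl_congr_mem'
  intro j hj st
  have hj' : j < (matriz.getD 0 []).length - tam := List.mem_range.mp hj
  rw [rq_eq matriz i j tam (by omega) (by omega), alt_local_eq]
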